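-- pv_equiv track=rewrite | github.com/pypi-data/pypi-mirror-282 | packages/DNBC4dev/DNBC4dev-2.3.9.tar.gz/DNBC4dev-2.3.9/dnbc4tools/tools/utils.py | seq_comp
-- ===== SOURCE A (Python) =====
-- def seq_comp(seq):
--     """
--     Compute the numerical representation of a DNA sequence.
--     Args:
--         seq (str): The DNA sequence.
--     Raises:
--         ValueError: If the input is not a non-empty string or contains invalid nucleotides.
--     Returns:
--         str: The numerical representation of the input sequence.
--     """
--     NT_COMP = {'A': '0', 'C': '1', 'G': '2', 'T': '3'}
--     if not isinstance(seq, str) or len(seq) == 0: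
--         raise ValueError("Input sequence must be a non-empty string")
--     if not all(n in NT_COMP for n in seq.upper()):
--         raise ValueError("Input sequence contains invalid nucleotides")
--
--     length = len(seq) - 1
--     sum = 0
--     for k, v in enumerate(seq.upper()):
--         sum += int(NT_COMP[v]) * (4 ** (length - k))
--     return str('%010x' % sum).upper()
-- ===== SOURCE B (Python) =====
-- def seq_comp(seq):
--     """
--     Compute the numerical representation of a DNA sequence.
--     Args:
--         seq (str): The DNA sequence.
--     Raises:
--         ValueError: If the input is not a non-empty string or contains invalid nucleotides.
--     Returns:
--         str: The numerical representation of the input sequence.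
--     """
--     NT_COMP = {'A': '0', 'C': '1', 'G': '2', 'T': '3'}
--     if not isinstance(seq, str) or len(seq) == 0:
--         raise ValueError("Input sequence must be a non-empty string")
--     if not all(n in NT_COMP for n in seq.upper()):
--         raise ValueError("Input sequence contains invalid nucleotides")
--
--     value = int(seq.upper().translate(str.maketrans(NT_COMP)), 4)
--     return ('%010x' % value).upper()
-- ===== Notes on version B (the rewrite author's own statement) =====
-- stated objective: idiomatic
-- what changed: Replaces the explicit positional loop accumulating digit*4**(length-k) with a character translation to a base-4 digit string parsed in one step by int(s, 4).
import Mathlib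
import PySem

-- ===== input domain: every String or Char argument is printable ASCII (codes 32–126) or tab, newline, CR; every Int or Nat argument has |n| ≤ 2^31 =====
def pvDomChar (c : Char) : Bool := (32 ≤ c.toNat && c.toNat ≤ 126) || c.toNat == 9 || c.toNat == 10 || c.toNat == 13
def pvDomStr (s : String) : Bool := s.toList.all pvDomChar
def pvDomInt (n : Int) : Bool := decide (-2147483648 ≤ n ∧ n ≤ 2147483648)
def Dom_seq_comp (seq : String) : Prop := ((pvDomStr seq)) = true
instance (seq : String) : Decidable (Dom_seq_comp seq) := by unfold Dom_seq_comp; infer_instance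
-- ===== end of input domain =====

-- B: translates the sequence to a base-4 digit string and radix-parses it (int(s,4)),
-- instead of A's explicit positional loop with per-position powers; same exact output.


-- shared helper: hand port of ('%010x' % n).upper() for n ≥ 0 (both Pythons end with this
-- exact expression; the accumulated value is always ≥ 0 here, so the Nat computation is exact)
def pvHexDigit (d : Nat) : Char := if d < 10 then Char.ofNat (48 + d) else Char.ofNat (87 + d)

def pvHexChars (n : Nat) : List Char :=
  if _h : n < 16 then [pvHexDigit n]
  else pvHexChars (n / 16) ++ [pvHexDigit (n % 16)]
decreasing_by exact Nat.div_lt_self (by omega) (by omega)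

def pvFmt010xUpper (n : Int) : String :=
  let ds := pvHexChars n.toNat
  PySem.Str.upper (String.ofList (List.replicate (10 - ds.length) '0' ++ ds))

-- ===== PORT A =====
def ntCompA : PySem.Dict Char String :=
  ((((PySem.Dict.empty).insert 'A' "0").insert 'C' "1").insert 'G' "2").insert 'T' "3"

-- literal port of A's loop: sum += int(NT_COMP[v]) * 4 ** (length - k) over enumerate(seq.upper()).
-- The KeyError/ValueError paths (invalid nucleotide, empty string) are excluded by Pre_,
-- where the .getD defaults are never taken; the exponent (length - k) is ≥ 0 for every
-- enumerated index, so .toNat is exact.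
def seq_comp (seq : String) : String :=
  let length : Int := PySem.Str.len seq - 1
  let sum : Int :=
    (PySem.List.enumerate (PySem.Str.upper seq).toList).foldl
      (fun s kv =>
        s + ((PySem.Int.ofStr? ((ntCompA.get? kv.2).getD "")).getD 0)
              * 4 ^ (length - kv.1).toNat) 0
  pvFmt010xUpper sum

-- ===== PORT B =====
-- the translate table: A/C/G/T ↦ base-4 digit value (other chars never reach the fold inside Pre_)
def ntDigitB (c : Char) : Int :=
  if c = 'A' then 0 else if c = 'C' then 1 else if c = 'G' then 2
  else if c = 'T' then 3 else 0

-- literal port of B: seq.upper().translate(table) then int(digit_string, 4) — radix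
-- parsing is the standard left-to-right Horner fold over the digit list
def seq_comp_alt (seq : String) : String :=
  let digits := (PySem.Str.upper seq).toList.map ntDigitB
  let value : Int := digits.foldl (fun a d => 4 * a + d) 0
  pvFmt010xUpper value

-- ===== PRECONDITION & SPEC =====
-- exactly the inputs on which A returns: non-empty and every character an ACGT nucleotide (either case)
def Pre_seq_comp (seq : String) : Prop :=
  seq ≠ "" ∧ seq.toList.all (fun c => PySem.Chars.upperChar c ∈ (['A', 'C', 'G', 'T'] : List Char)) = true
instance (seq : String) : Decidable (Pre_seq_comp seq) := by unfold Pre_seq_comp; infer_instance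

def pvWitness_seq_comp : String := "AcGT"

def Spec_seq_comp (seq : String) (out : String) : Prop := out = seq_comp_alt seq
instance (seq : String) (out : String) : Decidable (Spec_seq_comp seq out) := by unfold Spec_seq_comp; infer_instance

-- ===== CLAIM (what is proved, stated in full; the proofs are below) =====
def Claim_equal_seq_comp : Prop := ∀ (seq : String), Dom_seq_comp seq → Pre_seq_comp seq → Spec_seq_comp seq (seq_comp seq)

-- ===== LEMMAS AND PROOFS =====

-- digit agreement on valid upper-cased nucleotides
lemma digit_agree (c : Char) (h : c ∈ (['A','C','G','T'] : List Char)) :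
    (PySem.Int.ofStr? ((ntCompA.get? c).getD "")).getD 0 = ntDigitB c := by
  fin_cases h <;> decide

-- the Horner fold with an arbitrary accumulator scales the accumulator by 4^length
lemma horner_init (l : List Int) (a : Int) :
    l.foldl (fun x d => 4 * x + d) a
      = a * 4 ^ l.length + l.foldl (fun x d => 4 * x + d) 0 := by
  induction l generalizing a with
  | nil => simp
  | cons d l ih =>
    simp only [List.foldl_cons, List.length_cons]
    rw [ih (4 * a + d), ih (4 * 0 + d)]
    ring

-- the positional power sum over enumerate equals the Horner fold of the digit list
lemma powsum_eq_horner {α : Type} (l : List α) (v : α → Int) (s0 : Int) :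
    (PySem.List.enumerate l s0).foldl
        (fun s kv => s + v kv.2 * 4 ^ (s0 + (l.length : Int) - 1 - kv.1).toNat) 0
      = (l.map v).foldl (fun x d => 4 * x + d) 0 := by
  induction l generalizing s0 with
  | nil => simp [PySem.List.enumerate_nil]
  | cons a l ih =>
    have hfun : (fun (s : Int) (kv : Int × α) =>
          s + v kv.2 * 4 ^ (s0 + ((a :: l).length : Int) - 1 - kv.1).toNat)
        = (fun (s : Int) (kv : Int × α) =>
          s + v kv.2 * 4 ^ ((s0 + 1) + (l.length : Int) - 1 - kv.1).toNat) := by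
      funext s kv
      congr 3
      simp only [List.length_cons]
      push_cast
      omega
    rw [hfun, PySem.List.enumerate_cons, List.foldl_cons]
    have hhead : ((s0 + 1) + (l.length : Int) - 1 - s0).toNat = l.length := by omega
    rw [hhead]
    rw [PySem.List.foldl_add (g := fun kv : Int × α =>
          v kv.2 * 4 ^ ((s0 + 1) + (l.length : Int) - 1 - kv.1).toNat)]
    have hIH := ih (s0 + 1)
    rw [PySem.List.foldl_add (g := fun kv : Int × α =>
          v kv.2 * 4 ^ ((s0 + 1) + (l.length : Int) - 1 - kv.1).toNat)] at hIH
    simp only [zero_add] at hIH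
    rw [hIH]
    simp only [List.map_cons, List.foldl_cons]
    rw [horner_init (l.map v) (4 * 0 + v a), horner_init (l.map v) 0]
    simp [List.length_map]

-- ===== VERDICT (by name: the statement is the Claim_ definition above) =====
theorem seq_comp_spec : Claim_equal_seq_comp := by
  intro seq _ hpre
  unfold Spec_seq_comp
  simp only [seq_comp, seq_comp_alt]
  have hup : (PySem.Str.upper seq).toList = seq.toList.map PySem.Chars.upperChar := by
    rw [PySem.Str.toList_upper]; rfl
  have hlen : PySem.Str.len seq = (((PySem.Str.upper seq).toList.length : Int)) := by
    rw [hup, List.length_map, PySem.Str.len_eq]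
  rw [hlen]
  congr 1
  have hmem : ∀ c ∈ (PySem.Str.upper seq).toList, c ∈ (['A','C','G','T'] : List Char) := by
    intro c hc
    rw [hup] at hc
    obtain ⟨c0, hc0, rfl⟩ := List.mem_map.mp hc
    exact of_decide_eq_true ((List.all_eq_true.mp hpre.2) c0 hc0)
  set l := (PySem.Str.upper seq).toList with hl
  have hcongr : (PySem.List.enumerate l).foldl
      (fun s kv => s + ((PySem.Int.ofStr? ((ntCompA.get? kv.2).getD "")).getD 0)
            * 4 ^ ((l.length : Int) - 1 - kv.1).toNat) 0
    = (PySem.List.enumerate l).foldl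
      (fun s kv => s + ntDigitB kv.2 * 4 ^ (0 + (l.length : Int) - 1 - kv.1).toNat) 0 := by
    apply PySem.List.foldl_congr_mem
    intro acc kv hkv
    obtain ⟨k, hk, rfl⟩ := (PySem.List.mem_enumerate_iff l 0 kv).mp hkv
    rw [digit_agree _ (hmem _ (l.getElem_mem hk))]
    norm_num
  rw [hcongr, powsum_eq_horner l ntDigitB 0]
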